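-- pv_equiv track=rewrite | github.com/deluxjun/CrackingTheCodeInterview6E | interview-py/P1-5.py | calEditCount
-- ===== SOURCE A (Python) =====
-- def calEditCount(s, t):
--     table = {}
--     for c in s:
--         table[c] = 1
--
--     for c in t:
--         table[c] = 0
--
--     total = 0
--     for c in table.values():
--         if c == 1:
--             total += 1
--             if total > 1:
--                 return False
--
--     return True
-- ===== SOURCE B (Python) =====
-- def calEditCount(s, t):
--     # Streaming state machine: walk s once, remembering the single character of s
--     # seen so far that is absent from t; a second distinct absent character fails.
--     tchars = set(t)
--     missing = None
--     for c in s: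
--         if c not in tchars:
--             if missing is None:
--                 missing = c
--             elif c != missing:
--                 return False
--     return True
-- ===== Notes on version B (the rewrite author's own statement) =====
-- stated objective: alternative
-- what changed: Replaces A's three staged passes (mark every char of s with 1, overwrite chars of t with 0, then count surviving 1s) by a single streaming pass over s with an at-most-one-missing-character state machine that never builds a table over s and exits on the second distinct missing character.
import Mathlib
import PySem

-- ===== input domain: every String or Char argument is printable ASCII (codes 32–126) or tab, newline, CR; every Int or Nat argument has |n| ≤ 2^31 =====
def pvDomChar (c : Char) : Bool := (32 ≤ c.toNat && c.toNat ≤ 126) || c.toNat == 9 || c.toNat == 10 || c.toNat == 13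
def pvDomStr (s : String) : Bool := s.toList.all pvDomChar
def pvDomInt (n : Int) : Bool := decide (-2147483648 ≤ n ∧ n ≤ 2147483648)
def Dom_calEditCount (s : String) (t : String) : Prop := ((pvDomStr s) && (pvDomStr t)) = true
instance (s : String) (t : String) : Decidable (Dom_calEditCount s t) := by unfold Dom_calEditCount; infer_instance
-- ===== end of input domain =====

-- B replaces A's three staged passes (mark chars of s, overwrite chars of t, count
-- survivors) by one streaming pass over s with an at-most-one-missing-char state
-- machine (objective: alternative); same return value everywhere.

-- ===== PORT A =====
-- the final 'for c in table.values(): …' loop with its early return False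
def calEditCountLoop : List Int → Int → Bool
  | [], _ => true
  | c :: rest, total =>
    if c == 1 then
      if total + 1 > 1 then false
      else calEditCountLoop rest (total + 1)
    else calEditCountLoop rest total

def calEditCount (s : String) (t : String) : Bool :=
  let table : PySem.Dict Char Int := PySem.Dict.empty
  let table := s.toList.foldl (fun d c => d.insert c 1) table
  let table := t.toList.foldl (fun d c => d.insert c 0) table
  calEditCountLoop table.values 0

-- ===== PORT B =====
-- the 'for c in s: …' loop; 'missing' is the Option Char state, early return False
def calEditCountAltLoop (tchars : PySem.Set Char) : List Char → Option Char → Bool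
  | [], _ => true
  | c :: rest, missing =>
    if tchars.contains c then calEditCountAltLoop tchars rest missing
    else
      match missing with
      | none => calEditCountAltLoop tchars rest (some c)
      | some m => if c != m then false else calEditCountAltLoop tchars rest missing

def calEditCount_alt (s : String) (t : String) : Bool :=
  let tchars : PySem.Set Char := PySem.Set.ofList t.toList
  calEditCountAltLoop tchars s.toList none

-- ===== PRECONDITION & SPEC =====
def Spec_calEditCount (s : String) (t : String) (out : Bool) : Prop := out = calEditCount_alt s t
instance (s : String) (t : String) (out : Bool) : Decidable (Spec_calEditCount s t out) := by unfold Spec_calEditCount; infer_instance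

-- ===== CLAIM (what is proved, stated in full; the proofs are below) =====
def Claim_equal_calEditCount : Prop := ∀ (s : String) (t : String), Dom_calEditCount s t → Spec_calEditCount s t (calEditCount s t)

-- ===== LEMMAS AND PROOFS =====

-- A's counting loop returns 'count of 1-values plus running total stays ≤ 1'
theorem calEditCountLoop_eq (vs : List Int) : ∀ (total : Int), 0 ≤ total → total ≤ 1 →
    calEditCountLoop vs total = decide (total + (vs.count 1 : Int) ≤ 1) := by
  induction vs with
  | nil => intro total h0 h1; simp [calEditCountLoop]; omega
  | cons c rest ih =>
    intro total h0 h1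
    by_cases hc : c = 1
    · subst hc
      by_cases ht : total + 1 > 1
      · have h : total = 1 := by omega
        subst h
        simp [calEditCountLoop]
      · have h : total = 0 := by omega
        subst h
        simp only [calEditCountLoop, beq_self_eq_true, if_pos, if_neg ht]
        rw [ih (0 + 1) (by omega) (by omega)]
        apply decide_eq_decide.2
        simp
    · simp only [calEditCountLoop, beq_iff_eq, if_neg hc]
      rw [ih total h0 h1]
      simp [hc]

-- after the first loop, every stored value is 1
theorem values_one_after_first (l : List Char) : ∀ (d : PySem.Dict Char Int),
    (∀ p ∈ d.items, p.2 = 1) →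
    ∀ p ∈ (l.foldl (fun d c => d.insert c 1) d).items, p.2 = 1 := by
  induction l with
  | nil => intro d h; simpa using h
  | cons c rest ih =>
    intro d h
    simp only [List.foldl_cons]
    refine ih _ ?_
    intro p hp
    rcases (PySem.Dict.mem_items_insert d c 1 p).1 hp with h1 | h2
    · simp [h1]
    · exact h p h2.1

-- the second loop zeroes exactly the keys of t: the number of surviving 1-values
-- is the number of items with value 1 whose key does not occur in t
theorem count_one_after_second (t : List Char) : ∀ (d : PySem.Dict Char Int),
    ((t.foldl (fun d c => d.insert c 0) d).values.count 1) =
      (d.items.filter (fun p => p.2 == 1 && !(t.contains p.1))).length := by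
  induction t with
  | nil =>
    intro d
    simp only [List.foldl_nil, PySem.Dict.values]
    rw [List.count_eq_countP, List.countP_map, List.countP_eq_length_filter]
    apply congrArg
    apply List.filter_congr
    intro p _
    simp only [List.contains_nil, Bool.not_false, Bool.and_true]
    rfl
  | cons c rest ih =>
    intro d
    simp only [List.foldl_cons]
    rw [ih]
    by_cases hc : d.contains c = true
    · rw [PySem.Dict.items_insert_of_contains _ _ hc]
      rw [List.filter_map, List.length_map]
      apply congrArg
      apply List.filter_congr
      intro p _
      by_cases hp : p.1 = c
      · simp [hp]
      · simp [hp, Function.comp]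
    · rw [PySem.Dict.items_insert_of_not_contains _ _ (by simpa using hc)]
      rw [List.filter_append, List.length_append]
      have h2 : (([(c, (0:Int))]).filter (fun p => p.2 == 1 && !(rest.contains p.1))).length = 0 := by
        simp
      rw [h2, Nat.add_zero]
      apply congrArg
      apply List.filter_congr
      intro p hp
      have hne : p.1 ≠ c := by
        intro he
        have : d.contains p.1 = true := by
          rw [PySem.Dict.contains_eq_decide_mem_keys]
          exact decide_eq_true (PySem.Dict.mem_keys_of_mem_items d hp)
        rw [he] at this
        exact hc this
      simp [hne]

-- counting value-1 items when all values are 1 = counting keys, filtered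
theorem filter_items_all_one (d : PySem.Dict Char Int) (t : List Char)
    (h : ∀ p ∈ d.items, p.2 = 1) :
    (d.items.filter (fun p => p.2 == 1 && !(t.contains p.1))).length =
      (d.keys.filter (fun k => !(t.contains k))).length := by
  rw [PySem.Dict.keys, List.filter_map, List.length_map]
  apply congrArg
  apply List.filter_congr
  intro p hp
  simp [Function.comp, h p hp]

-- B's loop in state 'some m': succeeds iff every missing char ahead equals m
theorem altLoop_some (tchars : PySem.Set Char) (l : List Char) : ∀ (m : Char),
    calEditCountAltLoop tchars l (some m) =
      l.all (fun c => tchars.contains c || c == m) := by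
  induction l with
  | nil => intro m; simp [calEditCountAltLoop]
  | cons c rest ih =>
    intro m
    by_cases hc : c ∈ tchars
    · simp [calEditCountAltLoop, PySem.Set.contains, hc, ih]
    · by_cases hm : c = m
      · subst hm
        simp [calEditCountAltLoop, PySem.Set.contains, hc, ih]
      · simp [calEditCountAltLoop, PySem.Set.contains, hc, hm]

-- B's loop in state 'none': succeeds iff all missing chars ahead are pairwise equal
theorem altLoop_none (tchars : PySem.Set Char) (l : List Char) :
    calEditCountAltLoop tchars l none =
      decide (∀ a ∈ l, ∀ b ∈ l, a ∉ tchars → b ∉ tchars → a = b) := by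
  induction l with
  | nil => simp [calEditCountAltLoop]
  | cons c rest ih =>
    by_cases hc : c ∈ tchars
    · have hcb : tchars.contains c = true := by simp [PySem.Set.contains, hc]
      simp only [calEditCountAltLoop, hcb, if_pos, ih]
      apply decide_eq_decide.2
      constructor
      · intro h a ha b hb haf hbf
        rcases List.mem_cons.1 ha with rfl | ha'
        · exact absurd hc haf
        rcases List.mem_cons.1 hb with rfl | hb'
        · exact absurd hc hbf
        exact h a ha' b hb' haf hbf
      · intro h a ha b hb haf hbf
        exact h a (List.mem_cons_of_mem _ ha) b (List.mem_cons_of_mem _ hb) haf hbf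
    · have hcb : tchars.contains c = false := by simp [PySem.Set.contains, hc]
      simp only [calEditCountAltLoop, hcb, Bool.false_eq_true, altLoop_some]
      by_cases hall : ∀ x ∈ rest, (tchars.contains x || x == c) = true
      · have hpair : ∀ a ∈ c :: rest, ∀ b ∈ c :: rest, a ∉ tchars → b ∉ tchars → a = b := by
          intro a ha b hb haf hbf
          have key : ∀ x ∈ c :: rest, x ∉ tchars → x = c := by
            intro x hx hxf
            rcases List.mem_cons.1 hx with rfl | hx'
            · rfl
            · have := hall x hx'
              simp [PySem.Set.contains, hxf] at this
              exact this
          rw [key a ha haf, key b hb hbf]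
        rw [List.all_eq_true.2 hall, decide_eq_true hpair]
        simp
      · have hnp : ¬ (∀ a ∈ c :: rest, ∀ b ∈ c :: rest, a ∉ tchars → b ∉ tchars → a = b) := by
          intro h
          apply hall
          intro x hx
          by_cases hxm : x ∈ tchars
          · simp [PySem.Set.contains, hxm]
          · have := h x (List.mem_cons_of_mem _ hx) c (List.mem_cons_self) hxm hc
            simp [this]
        rw [decide_eq_false hnp]
        simpa using hall

-- a nodup list has length ≤ 1 iff its members are pairwise equal
theorem nodup_length_le_one {α : Type} (l : List α) (h : l.Nodup) :
    (l.length ≤ 1) ↔ ∀ a ∈ l, ∀ b ∈ l, a = b := by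
  match l with
  | [] => simp
  | [a] => simp
  | a :: b :: rest =>
    simp only [List.length_cons]
    constructor
    · omega
    · intro hab
      have hne : a ≠ b := by
        have := List.nodup_cons.1 h
        intro he; exact this.1 (he ▸ List.mem_cons_self)
      exact absurd (hab a List.mem_cons_self b (List.mem_cons_of_mem _ List.mem_cons_self)) hne

-- ===== VERDICT (by name: the statement is the Claim_ definition above) =====
theorem calEditCount_spec : Claim_equal_calEditCount := by
  intro s t _
  unfold Spec_calEditCount calEditCount calEditCount_alt
  simp only []
  rw [calEditCountLoop_eq _ 0 (by omega) (by omega)]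
  rw [count_one_after_second]
  rw [filter_items_all_one _ _ (values_one_after_first s.toList PySem.Dict.empty (by simp [PySem.Dict.empty]))]
  rw [PySem.Dict.keys_foldl_insert]
  have hkeys : PySem.Set.update (PySem.Dict.empty : PySem.Dict Char Int).keys s.toList
      = PySem.Set.ofList s.toList := by
    rw [show (PySem.Dict.empty : PySem.Dict Char Int).keys = [] from rfl,
      PySem.Set.update_nil_left]
  rw [hkeys]
  rw [altLoop_none]
  have hnd : ((PySem.Set.ofList s.toList).filter (fun k => !(t.toList.contains k))).Nodup :=
    (PySem.Set.nodup_ofList s.toList).filter _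
  apply decide_eq_decide.2
  rw [show (((0:Int) + (((PySem.Set.ofList s.toList).filter
        (fun k => !(t.toList.contains k))).length : Int) ≤ 1))
      ↔ (((PySem.Set.ofList s.toList).filter (fun k => !(t.toList.contains k))).length ≤ 1)
      from by omega]
  rw [nodup_length_le_one _ hnd]
  constructor
  · intro h a ha b hb haf hbf
    have haf' : a ∉ t.toList := fun hm => haf ((PySem.Set.mem_ofList t.toList a).2 hm)
    have hbf' : b ∉ t.toList := fun hm => hbf ((PySem.Set.mem_ofList t.toList b).2 hm)
    exact h a (List.mem_filter.2 ⟨(PySem.Set.mem_ofList s.toList a).2 ha, by simp [haf']⟩)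
      b (List.mem_filter.2 ⟨(PySem.Set.mem_ofList s.toList b).2 hb, by simp [hbf']⟩)
  · intro h a ha b hb
    rw [List.mem_filter] at ha hb
    refine h a ((PySem.Set.mem_ofList s.toList a).1 ha.1) b ((PySem.Set.mem_ofList s.toList b).1 hb.1) ?_ ?_
    · intro hm
      have : a ∈ t.toList := (PySem.Set.mem_ofList t.toList a).1 hm
      simpa [this] using ha.2
    · intro hm
      have : b ∈ t.toList := (PySem.Set.mem_ofList t.toList b).1 hm
      simpa [this] using hb.2
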